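-- pv_equiv track=rewrite | github.com/Ultrasubha/MyCodes | BeautifulPatterns/GiantAlphabets.py | O
-- ===== SOURCE A (Python) =====
-- def O(size,content):
-- 	str=""
-- 	str1=""
-- 	for i in range(size):
-- 		ext_offset=(size//2)-i
--
-- 		if ext_offset<0:
-- 			int_offset-=2
-- 		else:
-- 			int_offset=i+i
--
-- 		str+="  "*abs(ext_offset) + content + "  "*int_offset + content
--
-- 		if size%2==0:
-- 			if i==0:
-- 				str1=str
-- 		str+="\n"
-- 	str+=str1
-- 	return str
-- ===== SOURCE B (Python) =====
-- def O(size, content):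
--     if size <= 0:
--         return ""
--     w = size // 2
--     top = ["  " * (w - i) + content + "  " * (2 * i) + content for i in range(w + 1)]
--     if size % 2 == 0:
--         lines = top + list(reversed(top[1:-1]))
--         return "\n".join(lines) + "\n" + lines[0]
--     else:
--         lines = top + list(reversed(top[:-1]))
--         return "\n".join(lines) + "\n"
-- ===== Notes on version B (the rewrite author's own statement) =====
-- stated objective: alternative
-- what changed: Builds only the top half of the V-pattern (rows 0..size//2) and produces the bottom half by mirroring (reversing a slice of) the top rows, instead of iterating over all size rows with a running int_offset accumulator and a snapshot variable.
import Mathlib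
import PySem

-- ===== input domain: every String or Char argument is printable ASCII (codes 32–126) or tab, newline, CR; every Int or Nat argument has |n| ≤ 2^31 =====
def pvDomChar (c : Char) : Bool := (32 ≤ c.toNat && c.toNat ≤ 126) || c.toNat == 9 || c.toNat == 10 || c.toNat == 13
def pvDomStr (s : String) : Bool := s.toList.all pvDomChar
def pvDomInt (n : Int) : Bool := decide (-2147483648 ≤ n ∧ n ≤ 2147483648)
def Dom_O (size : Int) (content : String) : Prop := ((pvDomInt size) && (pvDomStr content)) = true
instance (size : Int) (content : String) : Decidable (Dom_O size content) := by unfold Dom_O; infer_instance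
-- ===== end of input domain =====

-- B builds only the top half of the V-pattern and mirrors it (reversed slice) for the
-- bottom half, instead of A's full-length loop with a running int_offset accumulator.

-- ===== PORT A =====
-- state = (str, str1, int_offset); Python's int_offset is unassigned before the first
-- iteration but never read before it is written, so 0 is a faithful initial value.
def O (size : Int) (content : String) : String :=
  let st := (PySem.List.pyRange 0 size 1).foldl
    (fun (st : List Char × List Char × Int) i =>
      let ext := PySem.Int.floordiv size 2 - i
      let io := if ext < 0 then st.2.2 - 2 else i + i
      let s := st.1 ++ PySem.List.pyRepeat "  ".toList |ext| ++ content.toList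
                ++ PySem.List.pyRepeat "  ".toList io ++ content.toList
      let s1 := if PySem.Int.mod size 2 = 0 ∧ i = 0 then s else st.2.1
      (s ++ ['\n'], s1, io))
    ([], [], 0)
  String.ofList (st.1 ++ st.2.1)

-- ===== PORT B =====
def O_alt (size : Int) (content : String) : String :=
  if size ≤ 0 then "" else
  let w := PySem.Int.floordiv size 2
  let top := (PySem.List.pyRange 0 (w + 1) 1).map (fun i =>
    PySem.List.pyRepeat "  ".toList (w - i) ++ content.toList
      ++ PySem.List.pyRepeat "  ".toList (2 * i) ++ content.toList)
  if PySem.Int.mod size 2 = 0 then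
    let lines := top ++ (PySem.List.slice top (some 1) (some (-1))).reverse
    String.ofList (PySem.Chars.join ['\n'] lines ++ ['\n'] ++ PySem.List.pyGetD lines 0 [])
  else
    let lines := top ++ (PySem.List.slice top none (some (-1))).reverse
    String.ofList (PySem.Chars.join ['\n'] lines ++ ['\n'])

-- ===== PRECONDITION & SPEC =====
def Spec_O (size : Int) (content : String) (out : String) : Prop := out = O_alt size content
instance (size : Int) (content : String) (out : String) : Decidable (Spec_O size content out) := by unfold Spec_O; infer_instance

-- ===== CLAIM (what is proved, stated in full; the proofs are below) =====
def Claim_equal_O : Prop := ∀ (size : Int) (content : String), Dom_O size content → Spec_O size content (O size content)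

-- ===== LEMMAS AND PROOFS =====

-- the row built for index i (shared characterisation of both programs' rows)
def pvLine (size : Int) (content : String) (i : Int) : List Char :=
  let h := PySem.Int.floordiv size 2
  PySem.List.pyRepeat "  ".toList |h - i| ++ content.toList
    ++ PySem.List.pyRepeat "  ".toList (if 0 ≤ h - i then 2 * i else 2 * h - 2 * (i - h)) ++ content.toList

-- the closed-form value of A's int_offset after processing row i
def pvIO (size : Int) (i : Int) : Int :=
  let h := PySem.Int.floordiv size 2
  if 0 ≤ h - i then 2 * i else 2 * h - 2 * (i - h)

theorem pvJoin_flatten (sep : Char) (l : List Char) (L : List (List Char)) :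
    PySem.Chars.join [sep] (l :: L) ++ [sep]
      = ((l :: L).map (fun x => x ++ [sep])).flatten := by
  induction L generalizing l with
  | nil => simp [PySem.Chars.join_singleton]
  | cons y ys ih =>
    rw [PySem.Chars.join_cons_cons]
    simp only [List.map_cons, List.flatten_cons] at ih ⊢
    rw [List.append_assoc, List.append_assoc, ih y]
    simp

-- invariant of A's fold: after the rows 0..n-1 (1 ≤ n ≤ size) the accumulated string is
-- the flattening of the rows each followed by '\n', str1 is row 0 iff size is even, and
-- int_offset is the closed form pvIO at n-1.
theorem pvFoldInv (size : Int) (content : String) (n : Nat) (h1 : 1 ≤ (n : Int))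
    (h2 : (n : Int) ≤ size) :
    (PySem.List.pyRange 0 n 1).foldl
      (fun (st : List Char × List Char × Int) i =>
        let ext := PySem.Int.floordiv size 2 - i
        let io := if ext < 0 then st.2.2 - 2 else i + i
        let s := st.1 ++ PySem.List.pyRepeat "  ".toList |ext| ++ content.toList
                  ++ PySem.List.pyRepeat "  ".toList io ++ content.toList
        let s1 := if PySem.Int.mod size 2 = 0 ∧ i = 0 then s else st.2.1
        (s ++ ['\n'], s1, io))
      ([], [], 0)
    = (((PySem.List.pyRange 0 n 1).map (fun i => pvLine size content i ++ ['\n'])).flatten,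
       (if PySem.Int.mod size 2 = 0 then pvLine size content 0 else []),
       pvIO size ((n : Int) - 1)) := by
  induction n with
  | zero => omega
  | succ m ih =>
    rcases Nat.eq_zero_or_pos m with hm | hm
    · subst hm
      have hr : PySem.List.pyRange 0 ((1 : Nat) : Int) 1 = [0] := by decide
      have hh : 0 ≤ PySem.Int.floordiv size 2 := by
        have := PySem.Int.le_floordiv_iff_mul_le (a := size) (b := 2) (q := 0) (by norm_num)
        omega
      rw [hr]
      have hnot : ¬ (PySem.Int.floordiv size 2 - 0 < 0) := by omega
      have hpos0 : (0 : Int) ≤ PySem.Int.floordiv size 2 - 0 := by omega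
      simp only [List.foldl_cons, List.foldl_nil, List.map_cons, List.map_nil,
        List.flatten_cons, List.flatten_nil, List.append_nil, List.nil_append,
        pvLine, pvIO, if_neg hnot, if_pos hpos0]
      norm_num
      omega
    · have hm1 : 1 ≤ ((m : Nat) : Int) := by exact_mod_cast hm
      have hm2 : ((m : Nat) : Int) ≤ size := by push_cast at h2 ⊢; omega
      have hsplit : PySem.List.pyRange 0 ((m + 1 : Nat) : Int) 1
          = PySem.List.pyRange 0 (m : Int) 1 ++ [(m : Int)] := by
        have := PySem.List.pyRange_one_succ_right (a := 0) (b := (m : Int)) (by omega)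
        push_cast
        exact this
      rw [hsplit, List.foldl_append, ih hm1 hm2]
      simp only [List.foldl_cons, List.foldl_nil, List.map_append, List.map_cons,
        List.map_nil, List.flatten_append, List.flatten_cons, List.flatten_nil]
      have h0 : 0 ≤ PySem.Int.floordiv size 2 := by
        have := PySem.Int.le_floordiv_iff_mul_le (a := size) (b := 2) (q := 0) (by norm_num)
        omega
      set hfd := PySem.Int.floordiv size 2 with hhfd
      have hio : (if hfd - (m : Int) < 0 then pvIO size ((m : Int) - 1) - 2
          else (m : Int) + (m : Int)) = pvIO size (m : Int) := by
        simp only [pvIO, ← hhfd]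
        rcases lt_or_ge hfd (m : Int) with h | h
        · have hc1 : hfd - (m : Int) < 0 := by omega
          have hc2 : ¬ 0 ≤ hfd - (m : Int) := by omega
          simp only [if_pos hc1, if_neg hc2]
          rcases lt_or_ge hfd ((m : Int) - 1) with h' | h'
          · have : ¬ 0 ≤ hfd - ((m : Int) - 1) := by omega
            simp only [if_neg this]; ring
          · have heq : hfd = (m : Int) - 1 := by omega
            have : 0 ≤ hfd - ((m : Int) - 1) := by omega
            simp only [if_pos this]; rw [heq]; ring
        · have hc1 : ¬ hfd - (m : Int) < 0 := by omega
          have hc2 : 0 ≤ hfd - (m : Int) := by omega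
          simp only [if_neg hc1, if_pos hc2]; ring
      have hne : ¬ ((m : Int) = 0) := by omega
      simp only [hne, and_false, if_false]
      rw [hio]
      simp only [pvLine, pvIO, ← hhfd]
      simp [List.append_assoc]

theorem pvBody (size : Int) (content : String) (hpos : 1 ≤ size) :
    PySem.Chars.join ['\n'] ((PySem.List.pyRange 0 size 1).map (pvLine size content)) ++ ['\n']
      = ((PySem.List.pyRange 0 size 1).map (fun i => pvLine size content i ++ ['\n'])).flatten := by
  have h : PySem.List.pyRange 0 size 1 = 0 :: PySem.List.pyRange 1 size 1 :=
    PySem.List.pyRange_one_cons (by omega)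
  rw [h, List.map_cons, pvJoin_flatten]
  simp [Function.comp_def]

-- the V-pattern is symmetric: row 2h - i equals row i (h = size // 2)
theorem pvMirror (size : Int) (content : String) (i : Int) :
    pvLine size content (2 * PySem.Int.floordiv size 2 - i) = pvLine size content i := by
  simp only [pvLine]
  set h := PySem.Int.floordiv size 2 with hh
  rw [show h - (2 * h - i) = -(h - i) by ring, abs_neg]
  rw [show (if 0 ≤ -(h - i) then 2 * (2 * h - i) else 2 * h - 2 * (2 * h - i - h))
      = (if 0 ≤ h - i then 2 * i else 2 * h - 2 * (i - h)) by split_ifs <;> omega]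

-- xs[1:-1] as drop/take
theorem pvSlice_one_neg_one {α : Type} (xs : List α) :
    PySem.List.slice xs (some 1) (some (-1)) = (xs.drop 1).take (xs.length - 2) := by
  cases xs with
  | nil => simp [PySem.List.slice]
  | cons a t => simp [PySem.List.slice]

-- the even-size mirror: rows 0..h, then rows h-1..1 in reverse, is rows 0..2h-1
theorem pvHalfEven {α : Type} (g : Nat → α) (h : Nat) (h1 : 1 ≤ h)
    (hg : ∀ j : Nat, j ≤ 2 * h → g (2 * h - j) = g j) :
    (List.range (h + 1)).map g ++ ((((List.range (h + 1)).map g).drop 1).take ((h + 1) - 2)).reverse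
      = (List.range (2 * h)).map g := by
  apply List.ext_getElem
  · simp; omega
  · intro i hi1 hi2
    simp only [List.length_append, List.length_map, List.length_range, List.length_reverse,
      List.length_take, List.length_drop] at hi1
    by_cases hc : i < h + 1
    · rw [List.getElem_append_left (by simp; omega)]
      simp
    · rw [List.getElem_append_right (by simp; omega)]
      simp only [List.getElem_reverse, List.getElem_take, List.getElem_drop, List.getElem_map,
        List.getElem_range, List.length_take, List.length_drop,
        List.length_map, List.length_range]
      rw [show 1 + (min (h + 1 - 2) (h + 1 - 1) - 1 - (i - (h + 1))) = 2 * h - i by omega]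
      exact hg i (by omega)

-- the odd-size mirror: rows 0..h, then rows h-1..0 in reverse, is rows 0..2h
theorem pvHalfOdd {α : Type} (g : Nat → α) (h : Nat)
    (hg : ∀ j : Nat, j ≤ 2 * h → g (2 * h - j) = g j) :
    (List.range (h + 1)).map g ++ (((List.range (h + 1)).map g).dropLast).reverse
      = (List.range (2 * h + 1)).map g := by
  apply List.ext_getElem
  · simp; omega
  · intro i hi1 hi2
    simp only [List.length_append, List.length_map, List.length_range, List.length_reverse,
      List.length_dropLast] at hi1
    by_cases hc : i < h + 1
    · rw [List.getElem_append_left (by simp; omega)]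
      simp
    · rw [List.getElem_append_right (by simp; omega)]
      simp only [List.getElem_reverse, List.getElem_dropLast, List.getElem_map,
        List.getElem_range, List.length_dropLast, List.length_map, List.length_range]
      rw [show h + 1 - 1 - 1 - (i - (h + 1)) = 2 * h - i by omega]
      exact hg i (by omega)

-- B's line list equals A's row list (the mirror construction is exactly rows 0..size-1)
theorem pvLines (size : Int) (content : String) (n : Nat) (hn : size = (n : Int)) (h1 : 1 ≤ n) :
    (let w := PySem.Int.floordiv size 2
     let top := (PySem.List.pyRange 0 (w + 1) 1).map (pvLine size content)
     if PySem.Int.mod size 2 = 0 then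
       top ++ (PySem.List.slice top (some 1) (some (-1))).reverse
     else
       top ++ (PySem.List.slice top none (some (-1))).reverse)
    = (PySem.List.pyRange 0 size 1).map (pvLine size content) := by
  subst hn
  have hw : PySem.Int.floordiv (n : Int) 2 = ((n / 2 : Nat) : Int) := by
    exact_mod_cast PySem.Int.floordiv_natCast n 2
  have hmod : PySem.Int.mod (n : Int) 2 = ((n % 2 : Nat) : Int) := by
    exact_mod_cast PySem.Int.mod_natCast n 2
  have hcast : ((n / 2 : Nat) : Int) + 1 = ((n / 2 + 1 : Nat) : Int) := by push_cast; ring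
  simp only [hw, hmod, hcast, PySem.List.pyRange_zero_natCast, List.map_map]
  set g : Nat → List Char := (pvLine (n : Int) content) ∘ (fun k : Nat => (k : Int)) with hgdef
  have hg : ∀ j : Nat, j ≤ 2 * (n / 2) → g (2 * (n / 2) - j) = g j := by
    intro j hj
    have hm := pvMirror (n : Int) content (j : Int)
    rw [hw] at hm
    have hc : ((2 * (n / 2) - j : Nat) : Int) = 2 * ((n / 2 : Nat) : Int) - (j : Int) := by
      push_cast [hj]; omega
    simp only [hgdef, Function.comp_apply, hc]
    exact hm
  by_cases hpar : n % 2 = 0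
  · have hz : ((n % 2 : Nat) : Int) = 0 := by exact_mod_cast hpar
    rw [if_pos hz]
    have hh1 : 1 ≤ n / 2 := by omega
    rw [pvSlice_one_neg_one]
    have hlen : ((List.range (n / 2 + 1)).map g).length = n / 2 + 1 := by simp
    rw [hlen]
    rw [pvHalfEven g (n / 2) hh1 hg]
    rw [show 2 * (n / 2) = n by omega]
  · have hz : ¬ ((n % 2 : Nat) : Int) = 0 := by
      intro hcon; exact hpar (by exact_mod_cast hcon)
    rw [if_neg hz]
    rw [PySem.List.slice_to_neg_one]
    rw [pvHalfOdd g (n / 2) hg]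
    rw [show 2 * (n / 2) + 1 = n by omega]

-- ===== VERDICT (by name: the statement is the Claim_ definition above) =====
theorem O_spec : Claim_equal_O := by
  unfold Claim_equal_O
  intro size content _
  unfold Spec_O O O_alt
  by_cases hle : size ≤ 0
  · rw [PySem.List.pyRange_one_eq_nil hle]
    simp only [List.foldl_nil]
    simp [if_pos hle]
  · have hpos : 0 < size := by omega
    obtain ⟨n, hn⟩ : ∃ n : Nat, size = (n : Int) := ⟨size.toNat, by omega⟩
    have h1 : 1 ≤ (n : Int) := by omega
    rw [show size = (n : Int) from hn] at *
    rw [pvFoldInv (n : Int) content n h1 (le_refl _)]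
    have hle2 : ¬ ((n : Int) ≤ 0) := by omega
    rw [if_neg hle2]
    have htop : (PySem.List.pyRange 0 (PySem.Int.floordiv (n : Int) 2 + 1) 1).map
        (fun i => PySem.List.pyRepeat "  ".toList (PySem.Int.floordiv (n : Int) 2 - i) ++ content.toList
          ++ PySem.List.pyRepeat "  ".toList (2 * i) ++ content.toList)
        = (PySem.List.pyRange 0 (PySem.Int.floordiv (n : Int) 2 + 1) 1).map (pvLine (n : Int) content) := by
      apply List.map_congr_left
      intro i hi
      have hmem := (PySem.List.mem_pyRange_one).1 hi
      have hge : 0 ≤ PySem.Int.floordiv (n : Int) 2 - i := by omega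
      simp only [pvLine, if_pos hge, abs_of_nonneg hge]
    have hlines := pvLines (n : Int) content n rfl (by omega)
    simp only at hlines
    by_cases hpar : PySem.Int.mod (n : Int) 2 = 0
    · rw [if_pos hpar] at hlines ⊢
      simp only [if_pos hpar]
      rw [htop, hlines]
      rw [pvBody (n : Int) content h1]
      have hget : PySem.List.pyGetD ((PySem.List.pyRange 0 (n : Int) 1).map (pvLine (n : Int) content)) 0 []
          = pvLine (n : Int) content 0 := by
        have := PySem.List.pyGetD_map_pyRange (f := pvLine (n : Int) content) (n := n) (k := 0)
          (d := ([] : List Char)) (by omega)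
        simpa using this
      rw [hget]
    · rw [if_neg hpar] at hlines ⊢
      simp only [if_neg hpar]
      rw [htop, hlines]
      rw [pvBody (n : Int) content h1]
      simp
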